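-- pv_equiv track=rewrite | github.com/sanromarth/tnpc-portal | remove_comments.py | remove_css_comments
-- ===== SOURCE A (Python) =====
-- def remove_css_comments(code):
--     """Remove /* */ comments from CSS."""
--     result = []
--     i = 0
--     in_single_quote = False
--     in_double_quote = False
--
--     while i < len(code):
--         if code[i] == "'" and not in_double_quote:
--             in_single_quote = not in_single_quote
--             result.append(code[i])
--             i += 1
--         elif code[i] == '"' and not in_single_quote:
--             in_double_quote = not in_double_quote
--             result.append(code[i])
--             i += 1
--         elif not in_single_quote and not in_double_quote and code[i:i+2] == '/*':
--             end = code.find('*/', i + 2)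
--             if end != -1:
--                 comment = code[i:end+2]
--                 newlines = comment.count('\n')
--                 result.append('\n' * newlines)
--                 i = end + 2
--             else:
--                 i += 2
--         else:
--             result.append(code[i])
--             i += 1
--
--     return ''.join(result)
-- ===== SOURCE B (Python) =====
-- def remove_css_comments(code):
--     """Remove /* */ comments from CSS (chunked scan with str.find instead of per-char state machine)."""
--     out = []
--     i = 0
--     n = len(code)
--     while i < n:
--         # in normal state: jump to the next delimiter in one find per kind
--         cands = [p for p in (code.find("'", i), code.find('"', i), code.find('/*', i)) if p != -1]
--         if not cands:
--             out.append(code[i:])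
--             break
--         p = min(cands)
--         out.append(code[i:p])
--         ch = code[p]
--         if ch == "'" or ch == '"':
--             q = code.find(ch, p + 1)
--             if q == -1:
--                 out.append(code[p:])
--                 break
--             out.append(code[p:q + 1])
--             i = q + 1
--         else:  # '/*'
--             e = code.find('*/', p + 2)
--             if e == -1:
--                 i = p + 2
--             else:
--                 out.append('\n' * code.count('\n', p, e + 2))
--                 i = e + 2
--     return ''.join(out)
-- ===== Notes on version B (the rewrite author's own statement) =====
-- stated objective: faster
-- what changed: Replaced A's per-character while loop with three boolean quote flags by a chunked scanner that locates the next delimiter (quote or '/*') with str.find, copies whole slices between delimiters, and consumes an entire quoted span or comment in one step.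
import Mathlib
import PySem

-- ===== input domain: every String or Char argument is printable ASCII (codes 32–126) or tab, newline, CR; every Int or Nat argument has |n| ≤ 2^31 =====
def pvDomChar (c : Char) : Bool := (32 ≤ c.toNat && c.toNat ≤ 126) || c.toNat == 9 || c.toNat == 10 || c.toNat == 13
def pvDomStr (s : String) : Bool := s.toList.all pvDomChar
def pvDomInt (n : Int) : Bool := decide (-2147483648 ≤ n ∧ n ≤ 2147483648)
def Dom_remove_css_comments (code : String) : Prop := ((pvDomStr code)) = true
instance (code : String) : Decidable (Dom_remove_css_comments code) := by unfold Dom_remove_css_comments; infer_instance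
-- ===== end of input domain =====

-- B replaces A's per-character three-flag state machine by a chunked scan that jumps
-- between delimiters (next quote / '/*' via str.find) and copies whole slices; same O(n),
-- measurably faster in Python by a constant factor (C-level find/slicing instead of a per-char loop).

-- ===== PORT A =====
-- first index j with cs[j] = a and cs[j+1] = b (ports str.find of a two-char pattern)
def findPair (a b : Char) : List Char → Option Nat
  | [] => none
  | c :: rest =>
    if c = a ∧ rest.head? = some b then some 0
    else (findPair a b rest).map (· + 1)

-- literal port of A's while loop: index i becomes the remaining suffix, flags are the two quote states
def loopA : List Char → Bool → Bool → List Char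
  | [], _, _ => []
  | c :: rest, sq, dq =>
    if c = '\'' ∧ dq = false then
      c :: loopA rest (!sq) dq
    else if c = '"' ∧ sq = false then
      c :: loopA rest sq (!dq)
    else if sq = false ∧ dq = false ∧ c = '/' ∧ rest.head? = some '*' then
      match findPair '*' '/' rest.tail with
      | some e =>
        -- comment = code[i:end+2]; append '\n' * comment.count('\n'); i = end + 2
        List.replicate ((c :: rest.take (e + 3)).count '\n') '\n' ++ loopA (rest.drop (e + 3)) sq dq
      | none => loopA rest.tail sq dq   -- i += 2
    else
      c :: loopA rest sq dq
termination_by cs => cs.length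
decreasing_by
  all_goals (simp; try omega)

def remove_css_comments (code : String) : String := String.ofList (loopA code.toList false false)

-- ===== PORT B =====
-- Python's min over the finds that are not -1
def minOpt (a b : Option Nat) : Option Nat :=
  match a, b with
  | none, b => b
  | some x, none => some x
  | some x, some y => some (min x y)

-- B's loop: in normal state jump to the nearest delimiter, then consume a whole
-- quoted chunk / whole comment at once
def loopB (cs : List Char) : List Char :=
  match minOpt (minOpt (cs.findIdx? (· = '\'')) (cs.findIdx? (· = '"'))) (findPair '/' '*' cs) with
  | none => cs                                  -- no delimiter left: copy the tail and stop
  | some p =>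
    cs.take p ++
      (match _h : cs.drop p with
       | [] => []                               -- unreachable: p < cs.length
       | ch :: rest =>
         if ch = '\'' ∨ ch = '"' then
           match rest.findIdx? (· = ch) with
           | none => ch :: rest                 -- unterminated quote: copy to end
           | some q => (ch :: rest.take (q + 1)) ++ loopB (rest.drop (q + 1))
         else
           match findPair '*' '/' rest.tail with
           | none => loopB rest.tail            -- unterminated '/*': skip the two chars
           | some e =>
             List.replicate ((ch :: rest.take (e + 3)).count '\n') '\n' ++ loopB (rest.drop (e + 3)))
termination_by cs.length
decreasing_by
  all_goals
    have hl := congrArg List.length _h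
    simp at hl ⊢
    omega

def remove_css_comments_alt (code : String) : String := String.ofList (loopB code.toList)

-- ===== PRECONDITION & SPEC =====
def Spec_remove_css_comments (code : String) (out : String) : Prop := out = remove_css_comments_alt code
instance (code : String) (out : String) : Decidable (Spec_remove_css_comments code out) := by unfold Spec_remove_css_comments; infer_instance

-- ===== CLAIM (what is proved, stated in full; the proofs are below) =====
def Claim_equal_remove_css_comments : Prop := ∀ (code : String), Dom_remove_css_comments code → Spec_remove_css_comments code (remove_css_comments code)

-- ===== LEMMAS AND PROOFS =====

lemma fi_at (cs : List Char) (a : Char) (p : Nat) (h : cs.findIdx? (· = a) = some p) :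
    cs[p]? = some a := by
  induction cs generalizing p with
  | nil => simp at h
  | cons c rest ih =>
    rw [List.findIdx?_cons] at h
    by_cases hc : c = a
    · simp [hc] at h; subst h; simp [hc]
    · simp [hc] at h
      obtain ⟨q, hq, rfl⟩ := h
      simpa using ih q hq

lemma fi_min (cs : List Char) (a : Char) (p : Nat) (h : cs.findIdx? (· = a) = some p) :
    ∀ j < p, cs[j]? ≠ some a := by
  induction cs generalizing p with
  | nil => simp at h
  | cons c rest ih =>
    rw [List.findIdx?_cons] at h
    by_cases hc : c = a
    · simp [hc] at h; subst h; omega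
    · simp [hc] at h
      obtain ⟨q, hq, rfl⟩ := h
      intro j hj
      cases j with
      | zero => simpa using hc
      | succ j => simpa using ih q hq j (by omega)

lemma fi_none (cs : List Char) (a : Char) (h : cs.findIdx? (· = a) = none) :
    ∀ j : Nat, cs[j]? ≠ some a := by
  rw [List.findIdx?_eq_none_iff] at h
  intro j hj
  have hlt : j < cs.length := (List.getElem?_eq_some_iff.mp hj).1
  have hm : a ∈ cs := by
    have he := (List.getElem?_eq_some_iff.mp hj).2
    rw [← he]
    exact cs.getElem_mem hlt
  simpa using h a hm

lemma fp_at (a b : Char) (cs : List Char) (p : Nat) (h : findPair a b cs = some p) :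
    cs[p]? = some a ∧ cs[p+1]? = some b := by
  induction cs generalizing p with
  | nil => simp [findPair] at h
  | cons c rest ih =>
    rw [findPair] at h
    split at h
    · rename_i hc
      cases h
      obtain ⟨rfl, hb⟩ := hc
      cases rest with
      | nil => simp at hb
      | cons d tl => simp at hb; simp [hb]
    · simp at h
      obtain ⟨q, hq, rfl⟩ := h
      simpa using ih q hq

lemma fp_min (a b : Char) (cs : List Char) (p : Nat) (h : findPair a b cs = some p) :
    ∀ j < p, ¬(cs[j]? = some a ∧ cs[j+1]? = some b) := by
  induction cs generalizing p with
  | nil => simp [findPair] at h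
  | cons c rest ih =>
    rw [findPair] at h
    split at h
    · cases h; omega
    · rename_i hc
      simp at h
      obtain ⟨q, hq, rfl⟩ := h
      intro j hj
      cases j with
      | zero =>
        rintro ⟨h1, h2⟩
        simp at h1
        apply hc
        refine ⟨h1, ?_⟩
        cases rest with
        | nil => simp at h2
        | cons d tl => simp at h2; simp [h2]
      | succ j =>
        have := ih q hq j (by omega)
        simpa using this

lemma fp_none (a b : Char) (cs : List Char) (h : findPair a b cs = none) :
    ∀ j : Nat, ¬(cs[j]? = some a ∧ cs[j+1]? = some b) := by
  induction cs generalizing a b with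
  | nil => simp
  | cons c rest ih =>
    rw [findPair] at h
    split at h
    · simp at h
    · rename_i hc
      simp at h
      intro j
      cases j with
      | zero =>
        rintro ⟨h1, h2⟩
        simp at h1
        apply hc
        refine ⟨h1, ?_⟩
        cases rest with
        | nil => simp at h2
        | cons d tl => simp at h2; simp [h2]
      | succ j =>
        have := ih a b h j
        simpa using this

-- in normal state A copies any delimiter-free prefix verbatim
lemma loopA_copy (k : Nat) (cs : List Char)
    (h : ∀ j < k, cs[j]? ≠ some '\'' ∧ cs[j]? ≠ some '"' ∧ ¬(cs[j]? = some '/' ∧ cs[j+1]? = some '*')) :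
    loopA cs false false = cs.take k ++ loopA (cs.drop k) false false := by
  induction k generalizing cs with
  | zero => simp
  | succ k ih =>
    cases cs with
    | nil => simp
    | cons c rest =>
      obtain ⟨h1, h2, h3⟩ := h 0 (by omega)
      simp at h1 h2
      have hc : ¬(c = '/' ∧ rest.head? = some '*') := by
        intro ⟨hx, hy⟩
        apply h3
        constructor
        · simpa using hx
        · cases rest with
          | nil => simp at hy
          | cons d tl => simp at hy ⊢; exact hy
      rw [loopA]
      simp only [h1, h2, false_and, if_false]
      rw [if_neg (by tauto)]
      have := ih rest (by
        intro j hj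
        have := h (j+1) (by omega)
        simpa using this)
      simp [this]

-- inside a quote A copies up to and including the matching close quote, then is back to normal
lemma loopA_sq (cs : List Char) :
    loopA cs true false =
      match cs.findIdx? (· = '\'') with
      | none => cs
      | some q => cs.take (q + 1) ++ loopA (cs.drop (q + 1)) false false := by
  induction cs with
  | nil => simp [loopA]
  | cons c rest ih =>
    rw [List.findIdx?_cons]
    by_cases hc : c = '\''
    · subst hc
      rw [loopA]
      simp
    · rw [loopA]
      rw [if_neg (by simp [hc])]
      rw [if_neg (by simp)]
      rw [if_neg (by simp)]
      simp only [show ((· = '\'') c : Bool) = false by simpa using hc, Bool.false_eq_true, if_false]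
      cases hfi : rest.findIdx? (· = '\'') with
      | none => simp [hfi] at ih; simp [ih]
      | some q => simp [hfi] at ih; simp [ih]

lemma loopA_dq (cs : List Char) :
    loopA cs false true =
      match cs.findIdx? (· = '"') with
      | none => cs
      | some q => cs.take (q + 1) ++ loopA (cs.drop (q + 1)) false false := by
  induction cs with
  | nil => simp [loopA]
  | cons c rest ih =>
    rw [List.findIdx?_cons]
    by_cases hc : c = '"'
    · subst hc
      rw [loopA]
      simp
    · rw [loopA]
      rw [if_neg (by simp)]
      rw [if_neg (by simp [hc])]
      rw [if_neg (by simp)]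
      simp only [show ((· = '"') c : Bool) = false by simpa using hc, Bool.false_eq_true, if_false]
      cases hfi : rest.findIdx? (· = '"') with
      | none => simp [hfi] at ih; simp [ih]
      | some q => simp [hfi] at ih; simp [ih]

lemma min3_some (p1 p2 p3 : Option Nat) (p : Nat)
    (h : minOpt (minOpt p1 p2) p3 = some p) :
    (p1 = some p ∨ p2 = some p ∨ p3 = some p) ∧
    (∀ x, p1 = some x → p ≤ x) ∧ (∀ x, p2 = some x → p ≤ x) ∧ (∀ x, p3 = some x → p ≤ x) := by
  cases p1 <;> cases p2 <;> cases p3 <;> simp [minOpt] at h ⊢ <;> omega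

lemma min3_none (p1 p2 p3 : Option Nat)
    (h : minOpt (minOpt p1 p2) p3 = none) : p1 = none ∧ p2 = none ∧ p3 = none := by
  (cases p1 <;> cases p2 <;> cases p3) <;> simp [minOpt] at h ⊢

lemma loopA_nil (sq dq : Bool) : loopA [] sq dq = [] := by rw [loopA]

lemma loopA_cons_sq (rest : List Char) :
    loopA ('\'' :: rest) false false = '\'' :: loopA rest true false := by
  rw [loopA]; rw [if_pos ⟨rfl, rfl⟩]; rfl

lemma loopA_cons_dq (rest : List Char) :
    loopA ('"' :: rest) false false = '"' :: loopA rest false true := by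
  rw [loopA]
  rw [if_neg (by simp)]
  rw [if_pos ⟨rfl, rfl⟩]
  rfl

lemma loopA_cons_comment (rest : List Char) (h : rest.head? = some '*') :
    loopA ('/' :: rest) false false =
      (match findPair '*' '/' rest.tail with
       | some e => List.replicate (('/' :: rest.take (e + 3)).count '\n') '\n' ++ loopA (rest.drop (e + 3)) false false
       | none => loopA rest.tail false false) := by
  rw [loopA]
  rw [if_neg (by simp)]
  rw [if_neg (by simp)]
  rw [if_pos ⟨rfl, rfl, rfl, h⟩]

lemma loopA_eq_loopB_aux : ∀ (n : Nat) (cs : List Char), cs.length ≤ n → loopA cs false false = loopB cs := by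
  intro n
  induction n with
  | zero =>
    intro cs h
    have hnil : cs = [] := List.eq_nil_of_length_eq_zero (by omega)
    subst hnil
    rw [loopB]
    simp [minOpt, findPair, loopA_nil]
  | succ n ih =>
    intro cs hlen
    cases hmin : minOpt (minOpt (cs.findIdx? (· = '\'')) (cs.findIdx? (· = '"'))) (findPair '/' '*' cs) with
    | none =>
      obtain ⟨h1, h2, h3⟩ := min3_none _ _ _ hmin
      have hcopy := loopA_copy cs.length cs
        (fun j _ => ⟨fi_none _ _ h1 j, fi_none _ _ h2 j, fp_none _ _ _ h3 j⟩)
      rw [loopB, hmin]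
      simpa [loopA_nil] using hcopy
    | some p =>
      obtain ⟨hor, hle1, hle2, hle3⟩ := min3_some _ _ _ _ hmin
      have hbefore : ∀ j < p, cs[j]? ≠ some '\'' ∧ cs[j]? ≠ some '"' ∧
          ¬(cs[j]? = some '/' ∧ cs[j+1]? = some '*') := by
        intro j hj
        refine ⟨?_, ?_, ?_⟩
        · cases hc : cs.findIdx? (· = '\'') with
          | none => exact fi_none _ _ hc j
          | some x => exact fi_min _ _ _ hc j (by have := hle1 x hc; omega)
        · cases hc : cs.findIdx? (· = '"') with
          | none => exact fi_none _ _ hc j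
          | some x => exact fi_min _ _ _ hc j (by have := hle2 x hc; omega)
        · cases hc : findPair '/' '*' cs with
          | none => exact fp_none _ _ _ hc j
          | some x => exact fp_min _ _ _ _ hc j (by have := hle3 x hc; omega)
      have hplt : p < cs.length := by
        rcases hor with h | h | h
        · exact (List.getElem?_eq_some_iff.mp (fi_at _ _ _ h)).1
        · exact (List.getElem?_eq_some_iff.mp (fi_at _ _ _ h)).1
        · exact (List.getElem?_eq_some_iff.mp (fp_at _ _ _ _ h).1).1
      obtain ⟨ch, rest, hdrop⟩ : ∃ ch rest, cs.drop p = ch :: rest := by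
        cases hd : cs.drop p with
        | nil =>
          exfalso
          have := congrArg List.length hd
          simp at this
          omega
        | cons a l => exact ⟨a, l, rfl⟩
      have hch : cs[p]? = some ch := by
        have h0 : (cs.drop p)[0]? = some ch := by rw [hdrop]; rfl
        rw [List.getElem?_drop] at h0
        simpa using h0
      have hnext : cs[p+1]? = rest.head? := by
        have h1 : (cs.drop p)[1]? = rest[0]? := by rw [hdrop]; rfl
        rw [List.getElem?_drop] at h1
        rw [List.head?_eq_getElem?]
        exact h1
      have hlen2 : cs.length = p + (rest.length + 1) := by
        have := congrArg List.length hdrop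
        simp at this
        omega
      have hA := loopA_copy p cs hbefore
      rw [hdrop] at hA
      rw [hA, loopB, hmin]
      split
      · rename_i himp
        simp at himp
      · rename_i p' hp'
        injection hp' with hp'
        subst hp'
        split
        · rename_i heq
          rw [hdrop] at heq
          cases heq
        · rename_i ch' rest' heq
          rw [hdrop] at heq
          obtain ⟨rfl, rfl⟩ : ch = ch' ∧ rest = rest' := by
            injection heq with e1 e2
            exact ⟨e1, e2⟩
          congr 1
          rcases hor with hq | hq | hq
          · -- next delimiter is a single quote
            have hc' : ch = '\'' := by
              have h2 := fi_at _ _ _ hq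
              rw [hch] at h2
              simpa using h2
            subst hc'
            rw [loopA_cons_sq, loopA_sq]
            rw [if_pos (Or.inl rfl)]
            cases hfi : rest.findIdx? (· = '\'') with
            | none => simp
            | some q =>
              have ihq := ih (rest.drop (q+1)) (by simp; omega)
              simp [ihq]
          · -- next delimiter is a double quote
            have hc' : ch = '"' := by
              have h2 := fi_at _ _ _ hq
              rw [hch] at h2
              simpa using h2
            subst hc'
            rw [loopA_cons_dq, loopA_dq]
            rw [if_pos (Or.inr rfl)]
            cases hfi : rest.findIdx? (· = '"') with
            | none => simp
            | some q =>
              have ihq := ih (rest.drop (q+1)) (by simp; omega)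
              simp [ihq]
          · -- next delimiter starts a comment
            obtain ⟨ha, hb⟩ := fp_at _ _ _ _ hq
            have hc' : ch = '/' := by
              rw [hch] at ha
              simpa using ha
            subst hc'
            have hstar : rest.head? = some '*' := by rw [← hnext]; exact hb
            rw [loopA_cons_comment rest hstar]
            rw [if_neg (by simp)]
            cases hfp : findPair '*' '/' rest.tail with
            | none =>
              simp only [hfp]
              exact ih rest.tail (by simp [List.length_tail]; omega)
            | some e =>
              simp only [hfp]
              have ihe := ih (rest.drop (e+3)) (by simp; omega)
              rw [ihe]

theorem loopA_eq_loopB (cs : List Char) : loopA cs false false = loopB cs :=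
  loopA_eq_loopB_aux cs.length cs (le_refl _)

-- ===== VERDICT (by name: the statement is the Claim_ definition above) =====
theorem remove_css_comments_spec : Claim_equal_remove_css_comments := by
  intro code _
  unfold Spec_remove_css_comments remove_css_comments remove_css_comments_alt
  rw [loopA_eq_loopB]
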